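-- pv_equiv track=rewrite | github.com/CodeWebMobile-AI/cwmai | scripts/capability_analyzer.py | _parse_recommendations
-- ===== SOURCE A (Python) =====
-- from typing import Dict, List, Any, Optional, Set
--
-- def _parse_recommendations(ai_response: str) -> List[Dict[str, str]]:
--     """Parse AI response into structured recommendations.
--
--     Args:
--         ai_response: AI-generated recommendation text
--
--     Returns:
--         Structured recommendations
--     """
--     # Simple parsing - in production would be more sophisticated
--     recommendations = []
--     lines = ai_response.split('\n')
--
--     current_rec = {}
--     for line in lines:
--         line = line.strip()
--         if line.startswith('1.') or line.startswith('-'):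
--             if current_rec:
--                 recommendations.append(current_rec)
--             current_rec = {'action': line.lstrip('1.- ')}
--         elif 'approach:' in line.lower():
--             current_rec['approach'] = line.split(':', 1)[1].strip()
--         elif 'priority:' in line.lower():
--             current_rec['priority'] = line.split(':', 1)[1].strip()
--         elif 'impact:' in line.lower():
--             current_rec['impact'] = line.split(':', 1)[1].strip()
--
--     if current_rec:
--         recommendations.append(current_rec)
--
--     return recommendations
-- ===== SOURCE B (Python) =====
-- def _parse_recommendations(ai_response: str):
--     # Group-then-transform: first partition stripped lines into groups at action
--     # markers, then map each group to a dict; emit non-empty dicts.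
--     groups = []
--     cur = []
--     for raw in ai_response.split('\n'):
--         line = raw.strip()
--         if line.startswith('1.') or line.startswith('-'):
--             groups.append(cur)
--             cur = [line]
--         else:
--             cur.append(line)
--     groups.append(cur)
--
--     out = []
--     for g in groups:
--         d = {}
--         rest = g
--         if g and (g[0].startswith('1.') or g[0].startswith('-')):
--             d['action'] = g[0].lstrip('1.- ')
--             rest = g[1:]
--         for line in rest:
--             low = line.lower()
--             if 'approach:' in low:
--                 d['approach'] = line.split(':', 1)[1].strip()
--             elif 'priority:' in low:
--                 d['priority'] = line.split(':', 1)[1].strip()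
--             elif 'impact:' in low:
--                 d['impact'] = line.split(':', 1)[1].strip()
--         if d:
--             out.append(d)
--     return out
-- ===== Notes on version B (the rewrite author's own statement) =====
-- stated objective: alternative
-- what changed: Replaces A's single-pass flush-on-boundary dict accumulator with a two-pass group-then-transform decomposition: first partition stripped lines into groups at action markers, then map each group to a recommendation dict and emit the non-empty ones.
import Mathlib
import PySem

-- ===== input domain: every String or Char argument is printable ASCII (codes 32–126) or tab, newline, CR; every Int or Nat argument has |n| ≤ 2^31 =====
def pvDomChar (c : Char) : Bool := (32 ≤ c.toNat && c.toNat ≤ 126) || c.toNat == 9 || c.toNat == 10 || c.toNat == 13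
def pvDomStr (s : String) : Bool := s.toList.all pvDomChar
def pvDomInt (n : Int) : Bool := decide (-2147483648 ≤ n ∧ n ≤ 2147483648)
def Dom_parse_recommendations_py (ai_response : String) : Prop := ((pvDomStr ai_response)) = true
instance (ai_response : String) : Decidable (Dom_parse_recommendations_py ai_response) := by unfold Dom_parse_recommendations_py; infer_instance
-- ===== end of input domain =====

-- B replaces A's flush-on-boundary accumulator by a two-pass group-then-transform
-- decomposition (partition lines into groups at action markers, then map each group
-- to a dict); same cost, different structure (objective: alternative).

-- helpers shared by both ports (identical expressions in both Python sources):
-- line.startswith('1.') or line.startswith('-')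
def pvIsAction (line : String) : Bool :=
  PySem.Str.startswith line "1." || PySem.Str.startswith line "-"

-- exact port of s.lstrip('1.- '): drop leading chars belonging to the set {'1','.','-',' '}
def pvLstripA (s : String) : String :=
  String.ofList (s.toList.dropWhile (fun c => c == '1' || c == '.' || c == '-' || c == ' '))

-- the shared elif chain on field lines ('approach:'/'priority:'/'impact:')
def pvFieldStep (d : PySem.Dict String String) (line : String) : PySem.Dict String String :=
  if PySem.Str.isIn "approach:" (PySem.Str.lower line) then
    d.insert "approach" (PySem.Str.strip (((PySem.Str.splitMax? line ":" 1).getD []).getD 1 ""))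
  else if PySem.Str.isIn "priority:" (PySem.Str.lower line) then
    d.insert "priority" (PySem.Str.strip (((PySem.Str.splitMax? line ":" 1).getD []).getD 1 ""))
  else if PySem.Str.isIn "impact:" (PySem.Str.lower line) then
    d.insert "impact" (PySem.Str.strip (((PySem.Str.splitMax? line ":" 1).getD []).getD 1 ""))
  else d

-- ===== PORT A =====
-- 'if current_rec: recommendations.append(current_rec)' (also A's final flush)
def pvFinish (st : List (PySem.Dict String String) × PySem.Dict String String) :
    List (PySem.Dict String String) :=
  if st.2.items = [] then st.1 else st.1 ++ [st.2]

def pvStepA (st : List (PySem.Dict String String) × PySem.Dict String String) (raw : String) :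
    List (PySem.Dict String String) × PySem.Dict String String :=
  let line := PySem.Str.strip raw
  if pvIsAction line then
    (pvFinish st, PySem.Dict.empty.insert "action" (pvLstripA line))
  else
    (st.1, pvFieldStep st.2 line)

def parse_recommendations_py (ai_response : String) : List (List (String × String)) :=
  let lines := (PySem.Str.split? ai_response "\n").getD []
  let st := lines.foldl pvStepA ([], PySem.Dict.empty)
  (pvFinish st).map (·.items)

-- ===== PORT B =====
-- first pass: partition stripped lines into groups at action markers
def pvGroupStep (st : List (List String) × List String) (raw : String) :
    List (List String) × List String :=
  let line := PySem.Str.strip raw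
  if pvIsAction line then (st.1 ++ [st.2], [line]) else (st.1, st.2 ++ [line])

-- second pass: a group becomes a dict
def pvRecOfGroup (g : List String) : PySem.Dict String String :=
  match g with
  | [] => PySem.Dict.empty
  | h :: t =>
    if pvIsAction h then t.foldl pvFieldStep (PySem.Dict.empty.insert "action" (pvLstripA h))
    else (h :: t).foldl pvFieldStep PySem.Dict.empty

-- 'if d: out.append(d)'
def pvEmit (out : List (PySem.Dict String String)) (g : List String) :
    List (PySem.Dict String String) :=
  let d := pvRecOfGroup g
  if d.items = [] then out else out ++ [d]

def parse_recommendations_py_alt (ai_response : String) : List (List (String × String)) :=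
  let lines := (PySem.Str.split? ai_response "\n").getD []
  let st := lines.foldl pvGroupStep ([], [])
  ((st.1 ++ [st.2]).foldl pvEmit []).map (·.items)

-- ===== PRECONDITION & SPEC =====
def Spec_parse_recommendations_py (ai_response : String) (out : List (List (String × String))) : Prop := out = parse_recommendations_py_alt ai_response
instance (ai_response : String) (out : List (List (String × String))) : Decidable (Spec_parse_recommendations_py ai_response out) := by unfold Spec_parse_recommendations_py; infer_instance

-- ===== CLAIM (what is proved, stated in full; the proofs are below) =====
def Claim_equal_parse_recommendations_py : Prop := ∀ (ai_response : String), Dom_parse_recommendations_py ai_response → Spec_parse_recommendations_py ai_response (parse_recommendations_py ai_response)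

-- ===== LEMMAS AND PROOFS =====
-- appending a non-action line to a group only runs the field chain on it
theorem pvRecOfGroup_snoc (g : List String) (l : String) (h : pvIsAction l = false) :
    pvRecOfGroup (g ++ [l]) = pvFieldStep (pvRecOfGroup g) l := by
  cases g with
  | nil => simp [pvRecOfGroup, h]
  | cons a t =>
    simp only [List.cons_append, pvRecOfGroup]
    split_ifs <;> simp [List.foldl_append]

-- emitting the groups gs ++ [cur] = emitting gs, then A's flush of cur's dict
theorem pvEmit_snoc (gs : List (List String)) (cur : List String) :
    (gs ++ [cur]).foldl pvEmit [] = pvFinish (gs.foldl pvEmit [], pvRecOfGroup cur) := by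
  simp [List.foldl_append, pvEmit, pvFinish]

-- loop invariant: A's (recs, current_rec) is (emitted groups so far, dict of the open group)
theorem pvMain (lines : List String) (gs : List (List String)) (cur : List String) :
    pvFinish (lines.foldl pvStepA (gs.foldl pvEmit [], pvRecOfGroup cur))
      = ((lines.foldl pvGroupStep (gs, cur)).1 ++ [(lines.foldl pvGroupStep (gs, cur)).2]).foldl pvEmit [] := by
  induction lines generalizing gs cur with
  | nil => simp [pvEmit, pvFinish]
  | cons raw rest ih =>
    simp only [List.foldl_cons, pvStepA, pvGroupStep]
    by_cases h : pvIsAction (PySem.Str.strip raw)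
    · simp only [h, if_true]
      have h1 : pvFinish (gs.foldl pvEmit [], pvRecOfGroup cur)
          = (gs ++ [cur]).foldl pvEmit [] := (pvEmit_snoc gs cur).symm
      have h2 : PySem.Dict.empty.insert "action" (pvLstripA (PySem.Str.strip raw))
          = pvRecOfGroup [PySem.Str.strip raw] := by simp [pvRecOfGroup, h]
      rw [h1, h2, ih (gs ++ [cur]) [PySem.Str.strip raw]]
    · simp only [h, Bool.false_eq_true, if_false]
      rw [← pvRecOfGroup_snoc cur (PySem.Str.strip raw) (by simpa using h), ih gs (cur ++ [PySem.Str.strip raw])]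

-- ===== VERDICT (by name: the statement is the Claim_ definition above) =====
theorem parse_recommendations_py_spec : Claim_equal_parse_recommendations_py := by
  intro s _
  unfold Spec_parse_recommendations_py parse_recommendations_py parse_recommendations_py_alt
  simp only []
  have h := pvMain ((PySem.Str.split? s "\n").getD []) [] []
  simp only [List.foldl_nil] at h
  rw [show (PySem.Dict.empty : PySem.Dict String String) = pvRecOfGroup [] from rfl, h]
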